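-- pv_equiv track=rewrite | github.com/benquick123/code-profiling | code/batch-2/vse-naloge-brez-testov/DN7-M-019.py | varen_premik
-- ===== SOURCE A (Python) =====
-- def varen_premik(x0, y0, x1, y1, mine):
--     if x0 == x1:
--         for y in range(min([y0,y1]),(max([y0,y1]))+1):
--             if (x1, y) in mine:
--                 return False
--     if y0==y1:
--         for x in range(min([x0,x1]),(max([x0,x1]))+1):
--             if (x, y0) in mine:
--                 return False
--     return True
--     """
--     Vrni `True`, če je pomik z (x0, y0) and (x1, y1) varen, `False`, če ni.
--
--     Args:
--         x0 (int): koordinata x začetnega polja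
--         y0 (int): koordinata y začetnega polja
--         x1 (int): koordinata x končnega polja
--         y1 (int): koordinata y končnega polja
--         mine (set of tuple of int): koordinate min
--
--     Returns:
--         bool: `True`, če je premik varen, `False`, če ni.
--     """
-- ===== SOURCE B (Python) =====
-- def varen_premik(x0, y0, x1, y1, mine):
--     for (mx, my) in mine:
--         if (x0 == x1 and mx == x1 and min(y0, y1) <= my <= max(y0, y1)) or \
--            (y0 == y1 and my == y0 and min(x0, x1) <= mx <= max(x0, x1)):
--             return False
--     return True
-- ===== Notes on version B (the rewrite author's own statement) =====
-- stated objective: idiomatic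
-- what changed: B makes one pass over the mines set testing each mine against the move segment arithmetically, instead of A's scan over every cell along the line with a membership test per cell.
import Mathlib
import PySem

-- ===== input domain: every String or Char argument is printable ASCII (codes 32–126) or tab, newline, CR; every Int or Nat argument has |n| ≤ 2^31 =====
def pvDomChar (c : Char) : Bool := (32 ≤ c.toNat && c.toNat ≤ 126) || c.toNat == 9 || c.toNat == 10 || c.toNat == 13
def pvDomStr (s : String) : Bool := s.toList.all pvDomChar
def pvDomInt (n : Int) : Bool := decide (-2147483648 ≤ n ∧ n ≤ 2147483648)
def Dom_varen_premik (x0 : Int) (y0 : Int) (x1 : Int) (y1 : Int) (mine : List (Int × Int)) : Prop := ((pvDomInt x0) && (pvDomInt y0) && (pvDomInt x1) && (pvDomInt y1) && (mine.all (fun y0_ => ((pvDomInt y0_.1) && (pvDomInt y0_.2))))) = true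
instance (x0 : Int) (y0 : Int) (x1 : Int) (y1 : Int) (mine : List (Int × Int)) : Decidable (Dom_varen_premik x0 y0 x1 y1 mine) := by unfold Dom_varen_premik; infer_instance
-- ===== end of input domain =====

-- B replaces A's scan over every cell of the move segment (membership test per cell)
-- by one pass over the mines, testing each mine against the segment arithmetically (idiomatic).

-- ===== PORT A =====
-- 'for y in range(...): if (x1, y) in mine: return False' — early-exit scan over the cell list
def pvScanV (x1 : Int) (mine : List (Int × Int)) : List Int → Bool
  | [] => false
  | y :: ys => if mine.contains (x1, y) then true else pvScanV x1 mine ys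

def pvScanH (y0 : Int) (mine : List (Int × Int)) : List Int → Bool
  | [] => false
  | x :: xs => if mine.contains (x, y0) then true else pvScanH y0 mine xs

def varen_premik (x0 : Int) (y0 : Int) (x1 : Int) (y1 : Int) (mine : List (Int × Int)) : Bool :=
  if x0 == x1 && pvScanV x1 mine (PySem.List.pyRange (min y0 y1) (max y0 y1 + 1) 1) then
    false
  else if y0 == y1 && pvScanH y0 mine (PySem.List.pyRange (min x0 x1) (max x0 x1 + 1) 1) then
    false
  else
    true

-- ===== PORT B =====
-- one pass over the mines; each mine is tested against the move segment arithmetically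
def varen_premik_alt (x0 : Int) (y0 : Int) (x1 : Int) (y1 : Int) : List (Int × Int) → Bool
  | [] => true
  | (mx, my) :: rest =>
    if (x0 == x1 && mx == x1 && decide (min y0 y1 ≤ my) && decide (my ≤ max y0 y1))
       || (y0 == y1 && my == y0 && decide (min x0 x1 ≤ mx) && decide (mx ≤ max x0 x1)) then
      false
    else
      varen_premik_alt x0 y0 x1 y1 rest

-- ===== PRECONDITION & SPEC =====
def Spec_varen_premik (x0 : Int) (y0 : Int) (x1 : Int) (y1 : Int) (mine : List (Int × Int)) (out : Bool) : Prop := out = varen_premik_alt x0 y0 x1 y1 mine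
instance (x0 : Int) (y0 : Int) (x1 : Int) (y1 : Int) (mine : List (Int × Int)) (out : Bool) : Decidable (Spec_varen_premik x0 y0 x1 y1 mine out) := by unfold Spec_varen_premik; infer_instance

-- ===== CLAIM (what is proved, stated in full; the proofs are below) =====
def Claim_equal_varen_premik : Prop := ∀ (x0 : Int) (y0 : Int) (x1 : Int) (y1 : Int) (mine : List (Int × Int)), Dom_varen_premik x0 y0 x1 y1 mine → Spec_varen_premik x0 y0 x1 y1 mine (varen_premik x0 y0 x1 y1 mine)

-- ===== LEMMAS AND PROOFS =====

theorem pvScanV_eq_any (x1 : Int) (mine : List (Int × Int)) (ys : List Int) :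
    pvScanV x1 mine ys = ys.any (fun y => mine.contains (x1, y)) := by
  induction ys with
  | nil => rfl
  | cons y ys ih => cases mine.contains (x1, y) <;> simp [pvScanV, ih]

theorem pvScanH_eq_any (y0 : Int) (mine : List (Int × Int)) (xs : List Int) :
    pvScanH y0 mine xs = xs.any (fun x => mine.contains (x, y0)) := by
  induction xs with
  | nil => rfl
  | cons x xs ih => cases mine.contains (x, y0) <;> simp [pvScanH, ih]

theorem alt_eq_any (x0 y0 x1 y1 : Int) (mine : List (Int × Int)) :
    varen_premik_alt x0 y0 x1 y1 mine =
      !(mine.any (fun m =>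
        (x0 == x1 && m.1 == x1 && decide (min y0 y1 ≤ m.2) && decide (m.2 ≤ max y0 y1))
        || (y0 == y1 && m.2 == y0 && decide (min x0 x1 ≤ m.1) && decide (m.1 ≤ max x0 x1)))) := by
  induction mine with
  | nil => rfl
  | cons m rest ih =>
    obtain ⟨mx, my⟩ := m
    rw [show varen_premik_alt x0 y0 x1 y1 ((mx, my) :: rest)
          = if (x0 == x1 && mx == x1 && decide (min y0 y1 ≤ my) && decide (my ≤ max y0 y1))
               || (y0 == y1 && my == y0 && decide (min x0 x1 ≤ mx) && decide (mx ≤ max x0 x1))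
            then false else varen_premik_alt x0 y0 x1 y1 rest from rfl,
        List.any_cons, ih]
    cases ((x0 == x1 && mx == x1 && decide (min y0 y1 ≤ my) && decide (my ≤ max y0 y1))
        || (y0 == y1 && my == y0 && decide (min x0 x1 ≤ mx) && decide (mx ≤ max x0 x1))) <;> simp

theorem rangeV_eq_mineV (x1 y0 y1 : Int) (mine : List (Int × Int)) :
    (PySem.List.pyRange (min y0 y1) (max y0 y1 + 1) 1).any (fun y => mine.contains (x1, y))
      = mine.any (fun m => m.1 == x1 && decide (min y0 y1 ≤ m.2) && decide (m.2 ≤ max y0 y1)) := by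
  rcases hb : (PySem.List.pyRange (min y0 y1) (max y0 y1 + 1) 1).any (fun y => mine.contains (x1, y)) with _ | _
  · symm
    rw [Bool.eq_false_iff] at hb ⊢
    intro hc
    apply hb
    simp only [List.any_eq_true] at hc ⊢
    obtain ⟨m, hm, hcond⟩ := hc
    simp only [Bool.and_eq_true, beq_iff_eq, decide_eq_true_eq] at hcond
    refine ⟨m.2, ?_, ?_⟩
    · rw [PySem.List.mem_pyRange_one]; omega
    · simp only [List.contains_eq_mem, decide_eq_true_eq]
      have : (x1, m.2) = m := by
        obtain ⟨a, b⟩ := m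
        simp_all
      rw [this]; exact hm
  · symm
    simp only [List.any_eq_true] at hb ⊢
    obtain ⟨y, hy, hmem⟩ := hb
    rw [PySem.List.mem_pyRange_one] at hy
    simp only [List.contains_eq_mem, decide_eq_true_eq] at hmem
    exact ⟨(x1, y), hmem, by simp; omega⟩

theorem rangeH_eq_mineH (y0 x0 x1 : Int) (mine : List (Int × Int)) :
    (PySem.List.pyRange (min x0 x1) (max x0 x1 + 1) 1).any (fun x => mine.contains (x, y0))
      = mine.any (fun m => m.2 == y0 && decide (min x0 x1 ≤ m.1) && decide (m.1 ≤ max x0 x1)) := by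
  rcases hb : (PySem.List.pyRange (min x0 x1) (max x0 x1 + 1) 1).any (fun x => mine.contains (x, y0)) with _ | _
  · symm
    rw [Bool.eq_false_iff] at hb ⊢
    intro hc
    apply hb
    simp only [List.any_eq_true] at hc ⊢
    obtain ⟨m, hm, hcond⟩ := hc
    simp only [Bool.and_eq_true, beq_iff_eq, decide_eq_true_eq] at hcond
    refine ⟨m.1, ?_, ?_⟩
    · rw [PySem.List.mem_pyRange_one]; omega
    · simp only [List.contains_eq_mem, decide_eq_true_eq]
      have : (m.1, y0) = m := by
        obtain ⟨a, b⟩ := m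
        simp_all
      rw [this]; exact hm
  · symm
    simp only [List.any_eq_true] at hb ⊢
    obtain ⟨x, hx, hmem⟩ := hb
    rw [PySem.List.mem_pyRange_one] at hx
    simp only [List.contains_eq_mem, decide_eq_true_eq] at hmem
    exact ⟨(x, y0), hmem, by simp; omega⟩

theorem any_hit_split (x0 y0 x1 y1 : Int) (mine : List (Int × Int)) :
    (mine.any (fun m =>
        (x0 == x1 && m.1 == x1 && decide (min y0 y1 ≤ m.2) && decide (m.2 ≤ max y0 y1))
        || (y0 == y1 && m.2 == y0 && decide (min x0 x1 ≤ m.1) && decide (m.1 ≤ max x0 x1))))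
      = ((x0 == x1) && mine.any (fun m => m.1 == x1 && decide (min y0 y1 ≤ m.2) && decide (m.2 ≤ max y0 y1))
        || (y0 == y1) && mine.any (fun m => m.2 == y0 && decide (min x0 x1 ≤ m.1) && decide (m.1 ≤ max x0 x1))) := by
  induction mine with
  | nil => simp
  | cons m rest ih =>
    simp only [List.any_cons, ih]
    cases x0 == x1 <;> cases y0 == y1 <;>
      cases m.1 == x1 <;> cases m.2 == y0 <;> simp [Bool.and_assoc, Bool.or_assoc, Bool.or_left_comm, Bool.or_comm]

-- ===== VERDICT (by name: the statement is the Claim_ definition above) =====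
theorem varen_premik_spec : Claim_equal_varen_premik := by
  intro x0 y0 x1 y1 mine _
  unfold Spec_varen_premik varen_premik
  rw [alt_eq_any, any_hit_split, pvScanV_eq_any, pvScanH_eq_any, rangeV_eq_mineV, rangeH_eq_mineH]
  cases (x0 == x1) && mine.any (fun m => m.1 == x1 && decide (min y0 y1 ≤ m.2) && decide (m.2 ≤ max y0 y1)) <;>
    cases (y0 == y1) && mine.any (fun m => m.2 == y0 && decide (min x0 x1 ≤ m.1) && decide (m.1 ≤ max x0 x1)) <;>
    simp
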